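-- pv_equiv track=rewrite | github.com/Antoo22D/Exercisce_Python_UNIVERSITY | N76.py | giudicebuono
-- ===== SOURCE A (Python) =====
-- def giudicebuono(tabella,M,N):
--     contT=0
--     contD=0
--     giudice=0
--     for i in range(M):
--         for j in range(N):
--             if tabella[i][j]>5:
--                 contT+=1
--         if contT>=contD:
--             contD=contT
--             giudice=i
--             contT=0
--         else:
--             contT=0
--     return giudice
-- ===== SOURCE B (Python) =====
-- def giudicebuono(tabella, M, N):
--     def count(i):
--         return sum(1 for j in range(N) if tabella[i][j] > 5)
--
--     def best(lo, hi):
--         # balanced tournament: (row index, count) of the argmax of count over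
--         # rows lo..hi-1; on equal counts the right (later) half wins.
--         if hi - lo == 1:
--             return (lo, count(lo))
--         mid = (lo + hi) // 2
--         l = best(lo, mid)
--         r = best(mid, hi)
--         return l if l[1] > r[1] else r
--
--     if M <= 0:
--         return 0
--     return best(0, M)[0]
-- ===== Notes on version B (the rewrite author's own statement) =====
-- stated objective: alternative
-- what changed: Replaces A's single fused loop with mutable counters by a recursive divide-and-conquer tournament: best(lo,hi) splits the row range at the midpoint, recursively finds each half's best row, and combines with a strict comparison so the later half wins ties (reproducing A's last-tie-wins rule); counting a row is a separate helper.
import Mathlib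
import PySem

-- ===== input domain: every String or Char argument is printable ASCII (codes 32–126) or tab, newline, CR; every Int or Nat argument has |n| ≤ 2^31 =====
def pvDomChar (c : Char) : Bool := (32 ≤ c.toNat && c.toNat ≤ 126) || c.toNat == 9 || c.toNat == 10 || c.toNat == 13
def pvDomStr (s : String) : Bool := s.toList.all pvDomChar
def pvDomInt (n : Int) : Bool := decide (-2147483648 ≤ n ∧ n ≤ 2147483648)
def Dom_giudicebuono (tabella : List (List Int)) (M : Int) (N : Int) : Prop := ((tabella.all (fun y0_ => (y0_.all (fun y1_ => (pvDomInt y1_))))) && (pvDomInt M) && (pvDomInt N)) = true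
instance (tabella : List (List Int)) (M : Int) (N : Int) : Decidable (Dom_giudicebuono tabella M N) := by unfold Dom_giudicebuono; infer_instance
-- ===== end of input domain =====

-- B replaces A's fused sequential loop (three mutable counters) by a recursive
-- divide-and-conquer tournament over the row range, combining halves with a strict
-- comparison so the later half wins ties (matching A's last-tie-wins rule).

-- ===== PORT A =====
def giudicebuono (tabella : List (List Int)) (M : Int) (N : Int) : Int :=
  let st := (PySem.List.pyRange 0 M 1).foldl
    (fun (st : Int × Int × Int) i =>
      let contT := (PySem.List.pyRange 0 N 1).foldl
        (fun c j => if PySem.List.pyGetD (PySem.List.pyGetD tabella i []) j 0 > 5 then c + 1 else c)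
        st.1
      if contT ≥ st.2.1 then (0, contT, i) else (0, st.2.1, st.2.2))
    (0, 0, 0)
  st.2.2

-- ===== PORT B =====
-- Source B's count(i): sum(1 for j in range(N) if tabella[i][j] > 5)
def pvCount (tabella : List (List Int)) (N : Int) (i : Int) : Int :=
  (PySem.List.pyRange 0 N 1).foldl
    (fun c j => if PySem.List.pyGetD (PySem.List.pyGetD tabella i []) j 0 > 5 then c + 1 else c) 0

-- Source B's best(lo, hi); Python's base test `hi - lo == 1` is written `hi - lo ≤ 1` only to
-- make the recursion total in Lean — every call giudicebuono_alt makes has hi - lo ≥ 1,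
-- where the two tests coincide.
def pvBest (tabella : List (List Int)) (N : Int) (lo hi : Int) : Int × Int :=
  if _hle : hi - lo ≤ 1 then (lo, pvCount tabella N lo)
  else
    let mid := PySem.Int.floordiv (lo + hi) 2
    let l := pvBest tabella N lo mid
    let r := pvBest tabella N mid hi
    if l.2 > r.2 then l else r
termination_by (hi - lo).toNat
decreasing_by
  all_goals
    rw [PySem.Int.floordiv_eq_ediv_of_pos (by omega : (0:Int) < 2)]
    omega

def giudicebuono_alt (tabella : List (List Int)) (M : Int) (N : Int) : Int :=
  if M ≤ 0 then 0 else (pvBest tabella N 0 M).1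

-- ===== PRECONDITION & SPEC =====
-- Pre_: exactly where the Python A returns. When N > 0 every processed row index must be in
-- range and each of the first M rows must have at least N entries; when N ≤ 0 the inner loop
-- never runs, tabella[i] is never evaluated, and A returns for any M.
def Pre_giudicebuono (tabella : List (List Int)) (M : Int) (N : Int) : Prop :=
  N ≤ 0 ∨ (M ≤ (tabella.length : Int) ∧ ∀ row ∈ tabella.take M.toNat, N ≤ (row.length : Int))
instance (tabella : List (List Int)) (M : Int) (N : Int) : Decidable (Pre_giudicebuono tabella M N) := by unfold Pre_giudicebuono; infer_instance
def pvWitness_giudicebuono : List (List Int) × Int × Int := ([[6, 1], [7, 8]], 2, 2)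

def Spec_giudicebuono (tabella : List (List Int)) (M : Int) (N : Int) (out : Int) : Prop := out = giudicebuono_alt tabella M N
instance (tabella : List (List Int)) (M : Int) (N : Int) (out : Int) : Decidable (Spec_giudicebuono tabella M N out) := by unfold Spec_giudicebuono; infer_instance

-- ===== CLAIM (what is proved, stated in full; the proofs are below) =====
def Claim_equal_giudicebuono : Prop := ∀ (tabella : List (List Int)) (M : Int) (N : Int), Dom_giudicebuono tabella M N → Pre_giudicebuono tabella M N → Spec_giudicebuono tabella M N (giudicebuono tabella M N)

-- ===== LEMMAS AND PROOFS =====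

-- the tournament combiner: later element wins ties
def pvOp (x y : Int × Int) : Int × Int := if x.2 > y.2 then x else y

-- the (index, count) pairs of a row range
def pvPairs (tabella : List (List Int)) (N : Int) (lo hi : Int) : List (Int × Int) :=
  (PySem.List.pyRange lo hi 1).map (fun i => (i, pvCount tabella N i))

-- reduce a nonempty list by pvOp, left to right
def pvRed1 : List (Int × Int) → Int × Int
  | [] => (0, 0)
  | x :: xs => xs.foldl pvOp x

lemma pvCount_nonneg (tabella : List (List Int)) (N : Int) (i : Int) :
    0 ≤ pvCount tabella N i := by
  unfold pvCount
  have : ∀ (l : List Int) (c : Int), 0 ≤ c →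
      0 ≤ l.foldl (fun c j => if PySem.List.pyGetD (PySem.List.pyGetD tabella i []) j 0 > 5 then c + 1 else c) c := by
    intro l
    induction l with
    | nil => intro c hc; simpa using hc
    | cons x xs ih => intro c hc; simp only [List.foldl_cons]; exact ih _ (by split <;> omega)
  exact this _ 0 le_rfl

lemma pvOp_foldl (s z : Int × Int) (l : List (Int × Int)) :
    l.foldl pvOp (pvOp s z) = pvOp s (l.foldl pvOp z) := by
  induction l generalizing z with
  | nil => rfl
  | cons y ys ih =>
    simp only [List.foldl_cons]
    rw [← ih]
    congr 1
    unfold pvOp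
    split_ifs <;> first | rfl | omega

lemma pvRed1_append (l1 l2 : List (Int × Int)) (h1 : l1 ≠ []) (h2 : l2 ≠ []) :
    pvRed1 (l1 ++ l2) = pvOp (pvRed1 l1) (pvRed1 l2) := by
  cases l1 with
  | nil => exact absurd rfl h1
  | cons x xs =>
    cases l2 with
    | nil => exact absurd rfl h2
    | cons y ys =>
      simp only [pvRed1, List.cons_append, List.foldl_cons, List.foldl_append]
      rw [← pvOp_foldl]

lemma pvPairs_ne_nil (tabella : List (List Int)) (N : Int) (lo hi : Int) (h : lo < hi) :
    pvPairs tabella N lo hi ≠ [] := by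
  unfold pvPairs
  rw [PySem.List.pyRange_one_cons h]
  simp

lemma pvPairs_split (tabella : List (List Int)) (N : Int) (lo m hi : Int)
    (h1 : lo ≤ m) (h2 : m ≤ hi) :
    pvPairs tabella N lo hi = pvPairs tabella N lo m ++ pvPairs tabella N m hi := by
  unfold pvPairs
  rw [PySem.List.pyRange_one_append lo m hi h1 h2, List.map_append]

-- B's tournament computes the left-to-right pvOp-reduction of the pair list
lemma pvBest_eq_red1 (tabella : List (List Int)) (N : Int) :
    ∀ (n : Nat) (lo hi : Int), (hi - lo).toNat = n → lo < hi →
      pvBest tabella N lo hi = pvRed1 (pvPairs tabella N lo hi) := by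
  intro n
  induction n using Nat.strong_induction_on with
  | _ n ih =>
    intro lo hi hn hlt
    rw [pvBest]
    by_cases hle : hi - lo ≤ 1
    · have hone : hi = lo + 1 := by omega
      simp only [hle, dif_pos]
      subst hone
      unfold pvPairs
      rw [PySem.List.pyRange_one_singleton]
      simp [pvRed1]
    · simp only [hle, dif_neg, not_false_iff]
      have hmid := PySem.Int.floordiv_eq_ediv_of_pos (a := lo + hi) (b := 2) (by omega)
      set mid := PySem.Int.floordiv (lo + hi) 2 with hmiddef
      have hb1 : lo < mid := by omega
      have hb2 : mid < hi := by omega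
      rw [ih (mid - lo).toNat (by omega) lo mid rfl hb1,
          ih (hi - mid).toNat (by omega) mid hi rfl hb2,
          pvPairs_split tabella N lo mid hi (by omega) (by omega),
          pvRed1_append _ _ (pvPairs_ne_nil _ _ _ _ hb1) (pvPairs_ne_nil _ _ _ _ hb2)]
      unfold pvOp
      split <;> simp_all

-- A's inner fold from an arbitrary start is start + count from 0
lemma pvCnt_shift (tabella : List (List Int)) (N : Int) (i c : Int) :
    (PySem.List.pyRange 0 N 1).foldl
      (fun c j => if PySem.List.pyGetD (PySem.List.pyGetD tabella i []) j 0 > 5 then c + 1 else c) c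
    = c + pvCount tabella N i := by
  unfold pvCount
  induction (PySem.List.pyRange 0 N 1) generalizing c with
  | nil => simp
  | cons x xs ih =>
    simp only [List.foldl_cons]
    rw [ih, ih (if _ > 5 then 0 + 1 else 0)]
    split <;> ring

-- A's fused loop over range n is the pvOp-fold of the pair list (components swapped)
lemma pvA_loop (tabella : List (List Int)) (N : Int) (n : Nat) (d g : Int) :
    ((List.range n).map (fun (k : Nat) => (k : Int))).foldl
      (fun (st : Int × Int × Int) i =>
        let contT := (PySem.List.pyRange 0 N 1).foldl
          (fun c j => if PySem.List.pyGetD (PySem.List.pyGetD tabella i []) j 0 > 5 then c + 1 else c)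
          st.1
        if contT ≥ st.2.1 then (0, contT, i) else (0, st.2.1, st.2.2))
      (0, d, g)
    = (0,
       (((List.range n).map (fun (k : Nat) => ((k : Int), pvCount tabella N k))).foldl pvOp (g, d)).2,
       (((List.range n).map (fun (k : Nat) => ((k : Int), pvCount tabella N k))).foldl pvOp (g, d)).1) := by
  induction n with
  | zero => simp
  | succ m ih =>
    rw [List.range_succ]
    simp only [List.map_append, List.map_cons, List.map_nil, List.foldl_append, ih,
      List.foldl_cons, List.foldl_nil]
    rw [pvCnt_shift]
    simp only [zero_add]
    unfold pvOp
    split_ifs <;> first | rfl | (exfalso; omega)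

-- ===== VERDICT (by name: the statement is the Claim_ definition above) =====
theorem giudicebuono_spec : Claim_equal_giudicebuono := by
  intro tabella M N _ _
  unfold Spec_giudicebuono giudicebuono giudicebuono_alt
  by_cases hM : M ≤ 0
  · have : M.toNat = 0 := by omega
    simp [PySem.List.pyRange_zero M, this, hM]
  · simp only [hM, if_neg, not_false_iff, PySem.List.pyRange_zero M, pvA_loop]
    have hlt : (0 : Int) < M := by omega
    rw [pvBest_eq_red1 tabella N (M - 0).toNat 0 M rfl hlt]
    have hpairs : pvPairs tabella N 0 M
        = (List.range M.toNat).map (fun (k : Nat) => ((k : Int), pvCount tabella N k)) := by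
      unfold pvPairs
      rw [PySem.List.pyRange_zero M, List.map_map]
      rfl
    rw [hpairs]
    obtain ⟨m, hm⟩ : ∃ m, M.toNat = m + 1 := ⟨M.toNat - 1, by omega⟩
    rw [hm, List.range_succ_eq_map]
    simp only [List.map_cons, List.foldl_cons, Nat.cast_zero]
    have h0 : pvOp ((0 : Int), (0 : Int)) ((0 : Int), pvCount tabella N 0) = (0, pvCount tabella N 0) := by
      unfold pvOp
      have := pvCount_nonneg tabella N 0
      split <;> first | rfl | omega
    rw [h0]
    rfl
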